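-- pv_equiv track=rewrite | github.com/JohnyTitov/coworking | main/forms.py | get_list_time
-- ===== SOURCE A (Python) =====
-- def get_list_time(name_time):
--
--     label_times = ('8', '', '9', '', '10', '', '11', '', '12', '', '13', '', '14', '',
--                    '15', '', '16', '', '17', '', '18', '', '19', '', '20', '', '21', '',)
--
--     begin_value = ('08:00', '08:30', '09:00', '09:30', '10:00', '10:30', '11:00', '11:30',
--                    '12:00', '12:30', '13:00', '13:30', '14:00', '14:30', '15:00', '15:30',
--                    '16:00', '16:30', '17:00', '17:30', '18:00', '18:30', '19:00', '19:30',
--                    '20:00', '20:30', '21:00', '21:30',)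
--
--     end_value = ('08:30', '09:00', '09:30', '10:00', '10:30', '11:00', '11:30', '12:00',
--                  '12:30', '13:00', '13:30', '14:00', '14:30', '15:00', '15:30', '16:00',
--                  '16:30', '17:00', '17:30', '18:00', '18:30', '19:00', '19:30', '20:00',
--                  '20:30', '21:00', '21:30', '22:00')
--
--     list_time = []
--     value = []
--
--     if name_time == 'time_begin':
--         value = begin_value
--     elif name_time == 'time_end':
--         value = end_value
--
--     for i in range(len(value)):
--             list_time.append((value[i], label_times[i]))
--     return list_time
-- ===== SOURCE B (Python) =====
-- def get_list_time(name_time):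
--     if name_time == 'time_begin':
--         off = 0
--     elif name_time == 'time_end':
--         off = 1
--     else:
--         return []
--     res = []
--     for i in range(28):
--         m = 8 * 60 + 30 * (i + off)
--         res.append((f'{m // 60:02d}:{m % 60:02d}', str(8 + i // 2) if i % 2 == 0 else ''))
--     return res
-- ===== Notes on version B (the rewrite author's own statement) =====
-- stated objective: simpler
-- what changed: B drops the three 28-element hardcoded tuples and generates each (value,label) pair arithmetically in one loop: minutes = 8*60+30*(i+offset) formatted as zero-padded h:m, label str(8+i//2) on even i.
import Mathlib
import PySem

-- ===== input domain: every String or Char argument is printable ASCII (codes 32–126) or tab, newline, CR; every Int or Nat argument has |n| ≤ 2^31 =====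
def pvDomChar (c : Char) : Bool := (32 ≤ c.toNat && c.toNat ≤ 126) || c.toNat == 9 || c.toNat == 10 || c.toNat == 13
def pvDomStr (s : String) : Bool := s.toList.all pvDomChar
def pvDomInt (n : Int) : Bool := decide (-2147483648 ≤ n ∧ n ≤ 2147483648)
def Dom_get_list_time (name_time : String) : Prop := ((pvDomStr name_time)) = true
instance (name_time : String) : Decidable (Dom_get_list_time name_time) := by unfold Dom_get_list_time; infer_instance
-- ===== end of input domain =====

-- B replaces A's three hardcoded 28-element tuples by arithmetic generation of each pair (objective: simpler).

-- ===== PORT A =====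
def get_list_time (name_time : String) : List (String × String) :=
  let label_times : List String := ["8", "", "9", "", "10", "", "11", "", "12", "", "13", "", "14", "", "15", "", "16", "", "17", "", "18", "", "19", "", "20", "", "21", ""]
  let begin_value : List String := ["08:00", "08:30", "09:00", "09:30", "10:00", "10:30", "11:00", "11:30", "12:00", "12:30", "13:00", "13:30", "14:00", "14:30", "15:00", "15:30", "16:00", "16:30", "17:00", "17:30", "18:00", "18:30", "19:00", "19:30", "20:00", "20:30", "21:00", "21:30"]
  let end_value : List String := ["08:30", "09:00", "09:30", "10:00", "10:30", "11:00", "11:30", "12:00", "12:30", "13:00", "13:30", "14:00", "14:30", "15:00", "15:30", "16:00", "16:30", "17:00", "17:30", "18:00", "18:30", "19:00", "19:30", "20:00", "20:30", "21:00", "21:30", "22:00"]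
  let value : List String :=
    if name_time == "time_begin" then begin_value
    else if name_time == "time_end" then end_value
    else []
  -- for i in range(len(value)): list_time.append((value[i], label_times[i]))
  (PySem.List.pyRange 0 (Int.ofNat value.length) 1).foldl
    (fun list_time i =>
      list_time ++ [((PySem.List.pyGet? value i).getD "", (PySem.List.pyGet? label_times i).getD "")])
    []

-- ===== PORT B =====
-- f'{n:02d}' for the nonnegative ints arising here
def pvPad2 (n : Int) : String :=
  if n < 10 then "0" ++ PySem.Int.toStr n else PySem.Int.toStr n

def get_list_time_alt (name_time : String) : List (String × String) :=
  let off? : Option Int :=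
    if name_time == "time_begin" then some 0
    else if name_time == "time_end" then some 1
    else none
  match off? with
  | none => []
  | some off =>
    (PySem.List.pyRange 0 28 1).foldl
      (fun res i =>
        let m : Int := 8 * 60 + 30 * (i + off)
        res ++ [(pvPad2 (PySem.Int.floordiv m 60) ++ ":" ++ pvPad2 (PySem.Int.mod m 60),
                 if PySem.Int.mod i 2 == 0 then PySem.Int.toStr (8 + PySem.Int.floordiv i 2) else "")])
      []

-- ===== PRECONDITION & SPEC =====
def Spec_get_list_time (name_time : String) (out : List (String × String)) : Prop := out = get_list_time_alt name_time
instance (name_time : String) (out : List (String × String)) : Decidable (Spec_get_list_time name_time out) := by unfold Spec_get_list_time; infer_instance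

-- ===== CLAIM (what is proved, stated in full; the proofs are below) =====
def Claim_equal_get_list_time : Prop := ∀ (name_time : String), Dom_get_list_time name_time → Spec_get_list_time name_time (get_list_time name_time)

-- ===== LEMMAS AND PROOFS =====

-- ===== VERDICT (by name: the statement is the Claim_ definition above) =====
theorem get_list_time_spec : Claim_equal_get_list_time := by
  intro name_time _
  unfold Spec_get_list_time get_list_time get_list_time_alt
  by_cases h1 : name_time = "time_begin"
  · subst h1; decide
  · by_cases h2 : name_time = "time_end"
    · subst h2; decide
    · simp [h1, h2, PySem.List.pyRange]
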